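-- pv_equiv track=rewrite | github.com/RheaaDsouza/recipe-recommendation-system | app.py | violates_allergies
-- ===== SOURCE A (Python) =====
-- def normalize_ingredient_data(ingredients):
--     """Convert ingredients to consistent format"""
--     normalized = []
--     for ing in ingredients:
--         if isinstance(ing, dict):
--             name = (ing['name'] or '').strip()
--             category = (ing['category'] or '').strip()
--         else:
--             name = str(ing).strip()
--             category = ''
--         if name:
--             normalized.append({'name': name, 'category': category})
--     return normalized
--
-- ALLERGY_CATEGORY_MAP = {
--     "dairy": {"Dairy Products & Eggs"},
--     "egg": {"Dairy Products & Eggs"},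
--     "seafood": {"Seafood"},
--     "shellfish": {"Seafood"},
--     "fish": {"Seafood"},
--     "meat": {"Meat"},
--     "poultry": {"Poultry"},
--     "nuts": {"Nuts & Seeds", "Shelf Stable Foods"},
--     "peanut": {"Nuts & Seeds", "Shelf Stable Foods"},
--     "soy": {"Shelf Stable Foods"},
--     "wheat": {"Grains & Flours"},
--     "gluten": {"Grains & Flours"},
-- }
--
-- ALLERGY_NAME_KEYWORDS = {
--     'dairy': ['milk', 'cheese', 'butter', 'cream', 'yogurt', 'ghee', 'whey', 'casein'],
--     'egg': ['egg', 'eggs', 'mayonnaise', 'mayo'],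
--     'nuts': ['almond', 'peanut', 'cashew', 'walnut', 'pecan', 'hazelnut', 'pistachio', 'macadamia', 'brazil'],
--     'peanut': ['peanut', 'groundnut'],
--     'shellfish': ['shrimp', 'crab', 'lobster', 'prawn', 'scallop', 'clam', 'mussel', 'oyster'],
--     'fish': ['fish', 'salmon', 'tuna', 'cod', 'trout', 'bass'],
--     'soy': ['soy', 'soya', 'tofu', 'edamame', 'miso', 'tempeh'],
--     'wheat': ['wheat', 'flour', 'bread', 'pasta', 'couscous'],
--     'gluten': ['wheat', 'barley', 'rye', 'malt', 'brewer'],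
-- }
--
-- def violates_allergies(ingredients, allergy_text):
--     """Check if ingredient list violates user allergies"""
--     if not allergy_text:
--         return False
--
--     allergy_text_lower = allergy_text.lower()
--     matched_allergies = [k for k in ALLERGY_CATEGORY_MAP.keys() if k in allergy_text_lower]
--
--     if not matched_allergies:
--         return False
--
--     normalized_ingredients = normalize_ingredient_data(ingredients)
--
--     categories = set()
--     names_concat = []
--     for ing in normalized_ingredients:
--         name = ing['name'].lower()
--         category = ing['category'].lower()
--         names_concat.append(name)
--         if category:
--             categories.add(category)
--
--     names_text = ' '.join(names_concat)
--
--     # Check by category mapping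
--     for allergy in matched_allergies:
--         restricted_categories = {c.lower() for c in ALLERGY_CATEGORY_MAP.get(allergy, set())}
--         if categories & restricted_categories:
--             return True
--
--     # Check by name keywords
--     for allergy in matched_allergies:
--         for keyword in ALLERGY_NAME_KEYWORDS.get(allergy, []):
--             if keyword in names_text:
--                 return True
--
--     return False
-- ===== SOURCE B (Python) =====
-- # One fused rules table (allergy key, lowered restricted categories, name keywords),
-- # scanned once with per-ingredient checks; no sets, no joined names text.
-- # Per-name keyword matching is exact because no keyword contains a space.
-- RULES = [
--     ("dairy", ["dairy products & eggs"],
--      ["milk", "cheese", "butter", "cream", "yogurt", "ghee", "whey", "casein"]),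
--     ("egg", ["dairy products & eggs"], ["egg", "eggs", "mayonnaise", "mayo"]),
--     ("seafood", ["seafood"], []),
--     ("shellfish", ["seafood"],
--      ["shrimp", "crab", "lobster", "prawn", "scallop", "clam", "mussel", "oyster"]),
--     ("fish", ["seafood"], ["fish", "salmon", "tuna", "cod", "trout", "bass"]),
--     ("meat", ["meat"], []),
--     ("poultry", ["poultry"], []),
--     ("nuts", ["nuts & seeds", "shelf stable foods"],
--      ["almond", "peanut", "cashew", "walnut", "pecan", "hazelnut", "pistachio", "macadamia", "brazil"]),
--     ("peanut", ["nuts & seeds", "shelf stable foods"], ["peanut", "groundnut"]),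
--     ("soy", ["shelf stable foods"], ["soy", "soya", "tofu", "edamame", "miso", "tempeh"]),
--     ("wheat", ["grains & flours"], ["wheat", "flour", "bread", "pasta", "couscous"]),
--     ("gluten", ["grains & flours"], ["wheat", "barley", "rye", "malt", "brewer"]),
-- ]
--
--
-- def violates_allergies(ingredients, allergy_text):
--     """Check if ingredient list violates user allergies (fused rules-table scan)."""
--     if not allergy_text:
--         return False
--
--     text = allergy_text.lower()
--     if not any(key in text for key, _, _ in RULES):
--         return False
--
--     fields = []
--     for ing in ingredients:
--         name = (ing['name'] or '').strip()
--         category = (ing['category'] or '').strip()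
--         if name:
--             fields.append((name.lower(), category.lower()))
--
--     for key, rcats, kws in RULES:
--         if key in text:
--             for name, cat in fields:
--                 if cat in rcats or any(kw in name for kw in kws):
--                     return True
--     return False
-- ===== Notes on version B (the rewrite author's own statement) =====
-- stated objective: alternative
-- what changed: B replaces A's two sequential per-allergy phases (a collected category set intersected per allergy, then each allergy's keywords searched in one joined names string) by a single fused literal rules table (key, pre-lowered restricted categories, keywords) scanned once, testing each normalized ingredient directly per matched rule with per-name keyword matching (exact since no keyword contains a space); no sets, no joined text, no separate normalize pass.
import Mathlib
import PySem

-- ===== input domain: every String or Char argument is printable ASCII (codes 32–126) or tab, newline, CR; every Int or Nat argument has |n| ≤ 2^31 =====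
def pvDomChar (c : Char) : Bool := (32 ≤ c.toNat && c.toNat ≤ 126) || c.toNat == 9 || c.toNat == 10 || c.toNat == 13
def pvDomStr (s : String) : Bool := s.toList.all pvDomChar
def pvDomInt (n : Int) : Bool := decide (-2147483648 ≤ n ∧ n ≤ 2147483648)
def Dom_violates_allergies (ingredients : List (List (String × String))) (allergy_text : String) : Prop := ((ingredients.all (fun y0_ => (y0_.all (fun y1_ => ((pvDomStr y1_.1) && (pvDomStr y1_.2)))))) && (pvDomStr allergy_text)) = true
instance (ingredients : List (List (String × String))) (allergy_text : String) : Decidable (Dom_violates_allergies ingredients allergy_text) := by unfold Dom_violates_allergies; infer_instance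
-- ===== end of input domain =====

-- B replaces A's two sequential per-allergy phases (category-set intersections, then keywords in a
-- joined names string) by one fused literal rules table (key, lowered categories, keywords) scanned
-- once, testing each ingredient directly per matched rule; objective: alternative (no speed claim).

-- ===== PORT A =====
-- ALLERGY_CATEGORY_MAP (insertion order; each value is the python set literal's elements in source order)
def pvCatMap : List (String × List String) :=
  [("dairy", ["Dairy Products & Eggs"]), ("egg", ["Dairy Products & Eggs"]),
   ("seafood", ["Seafood"]), ("shellfish", ["Seafood"]), ("fish", ["Seafood"]),
   ("meat", ["Meat"]), ("poultry", ["Poultry"]),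
   ("nuts", ["Nuts & Seeds", "Shelf Stable Foods"]), ("peanut", ["Nuts & Seeds", "Shelf Stable Foods"]),
   ("soy", ["Shelf Stable Foods"]), ("wheat", ["Grains & Flours"]), ("gluten", ["Grains & Flours"])]

-- ALLERGY_NAME_KEYWORDS
def pvKwMap : List (String × List String) :=
  [("dairy", ["milk", "cheese", "butter", "cream", "yogurt", "ghee", "whey", "casein"]),
   ("egg", ["egg", "eggs", "mayonnaise", "mayo"]),
   ("nuts", ["almond", "peanut", "cashew", "walnut", "pecan", "hazelnut", "pistachio", "macadamia", "brazil"]),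
   ("peanut", ["peanut", "groundnut"]),
   ("shellfish", ["shrimp", "crab", "lobster", "prawn", "scallop", "clam", "mussel", "oyster"]),
   ("fish", ["fish", "salmon", "tuna", "cod", "trout", "bass"]),
   ("soy", ["soy", "soya", "tofu", "edamame", "miso", "tempeh"]),
   ("wheat", ["wheat", "flour", "bread", "pasta", "couscous"]),
   ("gluten", ["wheat", "barley", "rye", "malt", "brewer"])]

-- ALLERGY_CATEGORY_MAP.get(k, set())
def catOf (k : String) : List String := (PySem.Dict.ofList pvCatMap).getD k []
-- ALLERGY_NAME_KEYWORDS.get(k, [])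
def kwOf (k : String) : List String := (PySem.Dict.ofList pvKwMap).getD k []

-- normalize_ingredient_data; under the type list[dict[str,str]] the isinstance(ing, dict)
-- branch is always taken and `x or ''` is the identity on str values; none = KeyError.
def normalize_ingredient_data (ingredients : List (List (String × String))) : Option (List (String × String)) :=
  ingredients.foldl
    (fun acc ing => acc.bind fun l =>
      match (PySem.Dict.ofList ing).get? "name" with
      | none => none
      | some n =>
        match (PySem.Dict.ofList ing).get? "category" with
        | none => none
        | some c =>
          let name := PySem.Str.strip n
          let category := PySem.Str.strip c
          if name ≠ "" then some (l ++ [(name, category)]) else some l)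
    (some [])

def violates_allergies (ingredients : List (List (String × String))) (allergy_text : String) : Bool :=
  if allergy_text = "" then false
  else
    let allergy_text_lower := PySem.Str.lower allergy_text
    let matched := (pvCatMap.map Prod.fst).filter (fun k => PySem.Str.isIn k allergy_text_lower)
    if matched.isEmpty then false
    else
      match normalize_ingredient_data ingredients with
      | none => false  -- unreachable under Pre_ (Python raises KeyError here)
      | some normalized =>
        let st := normalized.foldl
          (fun (p : PySem.Set String × List String) ing =>
            let name := PySem.Str.lower ing.1
            let category := PySem.Str.lower ing.2
            let names_concat := p.2 ++ [name]
            let categories := if category ≠ "" then PySem.Set.add p.1 category else p.1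
            (categories, names_concat))
          (PySem.Set.empty, [])
        let names_text := PySem.Str.join " " st.2
        -- first loop: check by category mapping (early return True = any)
        if matched.any (fun a =>
             !(PySem.Set.inter st.1 (PySem.Set.ofList ((catOf a).map PySem.Str.lower))).isEmpty)
        then true
        -- second loop: check by name keywords
        else if matched.any (fun a => (kwOf a).any (fun kw => PySem.Str.isIn kw names_text))
        then true
        else false

-- ===== PORT B =====
-- RULES: one fused table (allergy key, pre-lowered restricted categories, name keywords)
def pvRules : List (String × List String × List String) :=
  [("dairy", (["dairy products & eggs"],
    ["milk", "cheese", "butter", "cream", "yogurt", "ghee", "whey", "casein"])),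
   ("egg", (["dairy products & eggs"], ["egg", "eggs", "mayonnaise", "mayo"])),
   ("seafood", (["seafood"], [])),
   ("shellfish", (["seafood"],
    ["shrimp", "crab", "lobster", "prawn", "scallop", "clam", "mussel", "oyster"])),
   ("fish", (["seafood"], ["fish", "salmon", "tuna", "cod", "trout", "bass"])),
   ("meat", (["meat"], [])),
   ("poultry", (["poultry"], [])),
   ("nuts", (["nuts & seeds", "shelf stable foods"],
    ["almond", "peanut", "cashew", "walnut", "pecan", "hazelnut", "pistachio", "macadamia", "brazil"])),
   ("peanut", (["nuts & seeds", "shelf stable foods"], ["peanut", "groundnut"])),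
   ("soy", (["shelf stable foods"], ["soy", "soya", "tofu", "edamame", "miso", "tempeh"])),
   ("wheat", (["grains & flours"], ["wheat", "flour", "bread", "pasta", "couscous"])),
   ("gluten", (["grains & flours"], ["wheat", "barley", "rye", "malt", "brewer"]))]

-- B's inline normalization loop as structural recursion; none = KeyError
def pvFields : List (List (String × String)) → Option (List (String × String))
  | [] => some []
  | ing :: rest =>
    match (PySem.Dict.ofList ing).get? "name", (PySem.Dict.ofList ing).get? "category" with
    | some n, some c =>
      match pvFields rest with
      | some tail =>
        if PySem.Str.strip n = "" then some tail
        else some ((PySem.Str.lower (PySem.Str.strip n), PySem.Str.lower (PySem.Str.strip c)) :: tail)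
      | none => none
    | _, _ => none

def violates_allergies_alt (ingredients : List (List (String × String))) (allergy_text : String) : Bool :=
  if allergy_text = "" then false
  else
    let text := PySem.Str.lower allergy_text
    if !(pvRules.any (fun r => PySem.Str.isIn r.1 text)) then false
    else
      match pvFields ingredients with
      | none => false  -- unreachable under Pre_ (Python raises KeyError here)
      | some fields =>
        pvRules.any (fun r =>
          PySem.Str.isIn r.1 text &&
          fields.any (fun f => r.2.1.contains f.2 || r.2.2.any (fun kw => PySem.Str.isIn kw f.1)))

-- ===== PRECONDITION & SPEC =====
-- Pre_ excludes exactly the inputs where Python A raises KeyError: some allergy key matches the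
-- text (so normalize_ingredient_data runs) and some ingredient dict lacks 'name' or 'category'.
def Pre_violates_allergies (ingredients : List (List (String × String))) (allergy_text : String) : Prop :=
  (∃ k ∈ ["dairy", "egg", "seafood", "shellfish", "fish", "meat", "poultry", "nuts", "peanut", "soy", "wheat", "gluten"],
      PySem.Str.isIn k (PySem.Str.lower allergy_text) = true) →
  ∀ ing ∈ ingredients,
    (PySem.Dict.ofList ing).contains "name" = true ∧ (PySem.Dict.ofList ing).contains "category" = true
instance (ingredients : List (List (String × String))) (allergy_text : String) : Decidable (Pre_violates_allergies ingredients allergy_text) := by unfold Pre_violates_allergies; infer_instance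

def pvWitness_violates_allergies : (List (List (String × String))) × String :=
  ([[("name", "milk"), ("category", "Dairy Products & Eggs")]], "dairy")

def Spec_violates_allergies (ingredients : List (List (String × String))) (allergy_text : String) (out : Bool) : Prop := out = violates_allergies_alt ingredients allergy_text
instance (ingredients : List (List (String × String))) (allergy_text : String) (out : Bool) : Decidable (Spec_violates_allergies ingredients allergy_text out) := by unfold Spec_violates_allergies; infer_instance

-- ===== CLAIM (what is proved, stated in full; the proofs are below) =====
def Claim_equal_violates_allergies : Prop := ∀ (ingredients : List (List (String × String))) (allergy_text : String), Dom_violates_allergies ingredients allergy_text → Pre_violates_allergies ingredients allergy_text → Spec_violates_allergies ingredients allergy_text (violates_allergies ingredients allergy_text)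

-- ===== LEMMAS AND PROOFS =====

-- unfoldings of List.intercalate used below
lemma pv_ic0 (c : Char) : List.intercalate [c] ([] : List (List Char)) = [] := by
  simp [List.intercalate]
lemma pv_ic1 (c : Char) (x : List Char) : List.intercalate [c] [x] = x := by
  simp [List.intercalate]
lemma pv_ic2 (c : Char) (x y : List Char) (rest : List (List Char)) :
    List.intercalate [c] (x :: y :: rest) = x ++ [c] ++ List.intercalate [c] (y :: rest) := by
  simp [List.intercalate, List.intersperse]

-- a prefix free of the separator stops before a separator occurrence
lemma pv_prefix_append_cons {c : Char} :
    ∀ {t u : List Char} {v : List Char}, t <+: u ++ c :: v → c ∉ t → t <+: u := by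
  intro t
  induction t with
  | nil => intro u v _ _; exact List.nil_prefix
  | cons b t' ih =>
    intro u v h hc
    cases u with
    | nil =>
      rcases List.cons_prefix_cons.mp h with ⟨hb, _⟩
      exact absurd (hb ▸ List.mem_cons_self) hc
    | cons a u' =>
      rcases List.cons_prefix_cons.mp h with ⟨hb, ht⟩
      exact hb ▸ List.cons_prefix_cons.mpr ⟨rfl, ih ht (fun hm => hc (List.mem_cons_of_mem _ hm))⟩

-- a separator-free infix of u ++ c :: v lies inside u or inside v
lemma pv_infix_append_cons {c : Char} :
    ∀ {u : List Char} {t v : List Char}, t <:+: u ++ c :: v → c ∉ t → t <:+: u ∨ t <:+: v := by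
  intro u
  induction u with
  | nil =>
    intro t v h hc
    rcases List.infix_cons_iff.mp h with hp | hy
    · cases t with
      | nil => exact Or.inl (List.nil_infix)
      | cons b t' =>
        rcases List.cons_prefix_cons.mp hp with ⟨hb, _⟩
        exact absurd (hb ▸ List.mem_cons_self) hc
    · exact Or.inr hy
  | cons a u' ih =>
    intro t v h hc
    rcases List.infix_cons_iff.mp h with hp | h2
    · exact Or.inl (pv_prefix_append_cons (u := a :: u') hp hc).isInfix
    · rcases ih h2 hc with h3 | h3
      · exact Or.inl (List.infix_cons h3)
      · exact Or.inr h3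

-- each part is an infix of the intercalation
lemma pv_part_infix_intercalate (c : Char) :
    ∀ (ls : List (List Char)) (l : List Char), l ∈ ls → l <:+: List.intercalate [c] ls := by
  intro ls
  induction ls with
  | nil => intro l hl; cases hl
  | cons x ls ih =>
    intro l hl
    rcases List.mem_cons.mp hl with rfl | h
    · cases ls with
      | nil => rw [pv_ic1]
      | cons y rest =>
        rw [pv_ic2, List.append_assoc]
        exact (List.prefix_append l ([c] ++ List.intercalate [c] (y :: rest))).isInfix
    · cases ls with
      | nil => cases h
      | cons y rest =>
        rw [pv_ic2, List.append_assoc]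
        exact (ih l h).trans
          (((List.suffix_append [c] (List.intercalate [c] (y :: rest))).trans
            (List.suffix_append x ([c] ++ List.intercalate [c] (y :: rest)))).isInfix)

-- the key lemma: a nonempty, separator-free string is an infix of ' '.join(parts)
-- exactly when it is an infix of one of the parts
lemma pv_infix_intercalate_iff {c : Char} {t : List Char} (hne : t ≠ []) (hc : c ∉ t) :
    ∀ (ls : List (List Char)), (t <:+: List.intercalate [c] ls ↔ ∃ l ∈ ls, t <:+: l) := by
  intro ls
  induction ls with
  | nil =>
    rw [pv_ic0]
    constructor
    · intro h; exact absurd (List.eq_nil_of_infix_nil h) hne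
    · rintro ⟨l, h, _⟩; cases h
  | cons x ls ih =>
    cases ls with
    | nil =>
      rw [pv_ic1]; simp
    | cons y rest =>
      rw [pv_ic2, List.append_assoc]
      constructor
      · intro h
        have h' : t <:+: x ++ c :: List.intercalate [c] (y :: rest) := by simpa using h
        rcases pv_infix_append_cons h' hc with h1 | h1
        · exact ⟨x, List.mem_cons_self, h1⟩
        · rcases ih.mp h1 with ⟨l, hl, hli⟩
          exact ⟨l, List.mem_cons_of_mem _ hl, hli⟩
      · rintro ⟨l, hl, hli⟩
        have : l <:+: List.intercalate [c] (x :: y :: rest) := pv_part_infix_intercalate c _ l hl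
        rw [pv_ic2, List.append_assoc] at this
        exact hli.trans this

-- the pair fold of port A computes its two components independently
lemma pv_fold_pair (l : List (String × String)) (s : PySem.Set String) (ns : List String) :
    l.foldl
      (fun (p : PySem.Set String × List String) ing =>
        ((if PySem.Str.lower ing.2 ≠ "" then PySem.Set.add p.1 (PySem.Str.lower ing.2) else p.1),
         p.2 ++ [PySem.Str.lower ing.1])) (s, ns)
    = (l.foldl (fun s ing => if PySem.Str.lower ing.2 ≠ "" then PySem.Set.add s (PySem.Str.lower ing.2) else s) s,
       ns ++ l.map (fun ing => PySem.Str.lower ing.1)) := by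
  induction l generalizing s ns with
  | nil => simp
  | cons x l ih =>
    simp only [List.foldl_cons]
    rw [ih]
    simp

-- membership in the category-set fold
lemma pv_mem_catfold (l : List (String × String)) (s : PySem.Set String) (x : String) :
    (x ∈ l.foldl (fun s ing => if PySem.Str.lower ing.2 ≠ "" then PySem.Set.add s (PySem.Str.lower ing.2) else s) s)
    ↔ x ∈ s ∨ ∃ ing ∈ l, PySem.Str.lower ing.2 ≠ "" ∧ x = PySem.Str.lower ing.2 := by
  induction l generalizing s with
  | nil => simp
  | cons i l ih =>
    by_cases h : PySem.Str.lower i.2 ≠ ""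
    · simp only [List.foldl_cons, if_pos h, ih, PySem.Set.mem_add]
      constructor
      · rintro (⟨hs | he⟩ | ⟨ing, hm, hx⟩)
        · exact Or.inl hs
        · exact Or.inr ⟨i, List.mem_cons_self, h, he⟩
        · exact Or.inr ⟨ing, List.mem_cons_of_mem _ hm, hx⟩
      · rintro (hs | ⟨ing, hm, hne, hx⟩)
        · exact Or.inl (Or.inl hs)
        · rcases List.mem_cons.mp hm with rfl | hm
          · exact Or.inl (Or.inr hx)
          · exact Or.inr ⟨ing, hm, hne, hx⟩
    · simp only [List.foldl_cons, if_neg h, ih]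
      constructor
      · rintro (hs | ⟨ing, hm, hx⟩)
        · exact Or.inl hs
        · exact Or.inr ⟨ing, List.mem_cons_of_mem _ hm, hx⟩
      · rintro (hs | ⟨ing, hm, hne, hx⟩)
        · exact Or.inl hs
        · rcases List.mem_cons.mp hm with rfl | hm
          · exact absurd hne h
          · exact Or.inr ⟨ing, hm, hne, hx⟩

-- none of the lowered restricted categories is the empty string (12 literal keys)
lemma pv_no_empty_cat : ∀ k ∈ pvCatMap.map Prod.fst, "" ∉ (catOf k).map PySem.Str.lower := by decide

-- every keyword of every key is nonempty and space-free (literal check)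
lemma pv_kw_ok : ∀ k ∈ pvCatMap.map Prod.fst, ∀ kw ∈ kwOf k, kw.toList ≠ [] ∧ ' ' ∉ kw.toList := by decide

-- B's fused rules table agrees with A's two maps, entry by entry (literal check)
lemma pv_rules_spec : ∀ r ∈ pvRules, r.2.1 = (catOf r.1).map PySem.Str.lower ∧ r.2.2 = kwOf r.1 := by decide

lemma pv_rules_keys : pvRules.map Prod.fst = pvCatMap.map Prod.fst := by decide

lemma pv_if_or (b1 b2 : Bool) :
    (if b1 = true then true else if b2 = true then true else false) = (b1 || b2) := by
  cases b1 <;> cases b2 <;> rfl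

lemma pv_filter_empty {α : Type} (l : List α) (p : α → Bool) :
    (l.filter p).isEmpty = !(l.any p) := by
  induction l with
  | nil => rfl
  | cons x l ih => by_cases h : p x = true <;> simp [h, ih]

-- the lowering map that relates A's normalized list to B's fields
def pvLow (l : List (String × String)) : List (String × String) :=
  l.map (fun q => (PySem.Str.lower q.1, PySem.Str.lower q.2))

-- proof-local name for A's normalization step (keeps simp from unfolding the lambda)
def pvStepA (acc : Option (List (String × String))) (ing : List (String × String)) :
    Option (List (String × String)) :=
  acc.bind fun l =>
    match (PySem.Dict.ofList ing).get? "name" with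
    | none => none
    | some n =>
      match (PySem.Dict.ofList ing).get? "category" with
      | none => none
      | some c =>
        let name := PySem.Str.strip n
        let category := PySem.Str.strip c
        if name ≠ "" then some (l ++ [(name, category)]) else some l

lemma pv_norm_eq (l : List (List (String × String))) :
    normalize_ingredient_data l = l.foldl pvStepA (some []) := rfl

lemma pvA_step_noname (l : List (String × String)) (ing : List (String × String))
    (h : (PySem.Dict.ofList ing).get? "name" = none) : pvStepA (some l) ing = none := by
  simp [pvStepA, h]

lemma pvA_step_nocat (l : List (String × String)) (ing : List (String × String)) (n : String)
    (hn : (PySem.Dict.ofList ing).get? "name" = some n)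
    (hc : (PySem.Dict.ofList ing).get? "category" = none) : pvStepA (some l) ing = none := by
  simp [pvStepA, hn, hc]

lemma pvA_step_some (l : List (String × String)) (ing : List (String × String)) (n c : String)
    (hn : (PySem.Dict.ofList ing).get? "name" = some n)
    (hc : (PySem.Dict.ofList ing).get? "category" = some c) :
    pvStepA (some l) ing =
      if PySem.Str.strip n ≠ "" then some (l ++ [(PySem.Str.strip n, PySem.Str.strip c)]) else some l := by
  simp [pvStepA, hn, hc]

lemma pvA_foldl_none : ∀ (m : List (List (String × String))), m.foldl pvStepA none = none := by
  intro m; induction m with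
  | nil => rfl
  | cons y m ihm => simpa [pvStepA] using ihm

-- A's foldl with a some-accumulator prepends the accumulator
lemma pv_norm_step :
    ∀ (l : List (List (String × String))) (acc : List (String × String)),
      l.foldl pvStepA (some acc) = (l.foldl pvStepA (some [])).map (acc ++ ·) := by
  intro l
  induction l with
  | nil => intro acc; simp
  | cons x l ih =>
    intro acc
    simp only [List.foldl_cons]
    cases hn : (PySem.Dict.ofList x).get? "name" with
    | none => rw [pvA_step_noname _ _ hn, pvA_step_noname _ _ hn, pvA_foldl_none]; rfl
    | some n =>
      cases hc : (PySem.Dict.ofList x).get? "category" with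
      | none =>
        rw [pvA_step_nocat _ _ _ hn hc, pvA_step_nocat _ _ _ hn hc, pvA_foldl_none]; rfl
      | some c =>
        rw [pvA_step_some _ _ _ _ hn hc, pvA_step_some _ _ _ _ hn hc]
        by_cases hne : PySem.Str.strip n ≠ ""
        · rw [if_pos hne, if_pos hne, List.nil_append, ih, ih [(PySem.Str.strip n, PySem.Str.strip c)]]
          cases l.foldl pvStepA (some []) <;> simp
        · rw [if_neg hne, if_neg hne, ih]

-- B's normalization equals the lowering of A's
lemma pv_fields_norm (l : List (List (String × String))) :
    pvFields l = (normalize_ingredient_data l).map pvLow := by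
  induction l with
  | nil => rfl
  | cons x l ih =>
    rw [pv_norm_eq] at *
    simp only [List.foldl_cons]
    cases hn : (PySem.Dict.ofList x).get? "name" with
    | none => rw [pvA_step_noname _ _ hn, pvA_foldl_none]; simp [pvFields, hn]
    | some n =>
      cases hc : (PySem.Dict.ofList x).get? "category" with
      | none => rw [pvA_step_nocat _ _ _ hn hc, pvA_foldl_none]; simp [pvFields, hn, hc]
      | some c =>
        rw [pvA_step_some _ _ _ _ hn hc]
        by_cases hne : PySem.Str.strip n ≠ ""
        · rw [if_pos hne, List.nil_append, pv_norm_step l [(PySem.Str.strip n, PySem.Str.strip c)]]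
          simp only [pvFields, hn, hc, if_neg (by simpa using hne), ih]
          cases l.foldl pvStepA (some []) with
          | none => rfl
          | some tail => simp [pvLow]
        · rw [if_neg hne]
          push_neg at hne
          simp only [pvFields, hn, hc, if_pos hne, ih]
          cases l.foldl pvStepA (some []) <;> rfl

theorem pv_main : ∀ (ingredients : List (List (String × String))) (allergy_text : String),
    violates_allergies ingredients allergy_text = violates_allergies_alt ingredients allergy_text := by
  intro ingredients allergy_text
  by_cases h0 : allergy_text = ""
  · simp [violates_allergies, violates_allergies_alt, h0]
  simp only [violates_allergies, violates_allergies_alt, if_neg h0]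
  have hguard : ((pvCatMap.map Prod.fst).filter
      (fun k => PySem.Str.isIn k (PySem.Str.lower allergy_text))).isEmpty
      = !(pvRules.any (fun r => PySem.Str.isIn r.1 (PySem.Str.lower allergy_text))) := by
    rw [pv_filter_empty, ← pv_rules_keys, List.any_map]
    rfl
  cases hb : pvRules.any (fun r => PySem.Str.isIn r.1 (PySem.Str.lower allergy_text)) with
  | false => simp only [hguard, hb]; rfl
  | true =>
    simp only [hguard, hb, Bool.not_true, Bool.false_eq_true, if_false]
    rw [pv_fields_norm]
    cases hn : normalize_ingredient_data ingredients with
    | none => rfl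
    | some normalized =>
      simp only [Option.map_some]
      rw [pv_fold_pair, List.nil_append]
      have hsub : ∀ a ∈ (pvCatMap.map Prod.fst).filter
          (fun k => PySem.Str.isIn k (PySem.Str.lower allergy_text)), a ∈ pvCatMap.map Prod.fst :=
        fun a ha => List.mem_of_mem_filter ha
      set matched := (pvCatMap.map Prod.fst).filter
        (fun k => PySem.Str.isIn k (PySem.Str.lower allergy_text)) with hm
      rw [pv_if_or, Bool.eq_iff_iff]
      simp only [Bool.or_eq_true, List.any_eq_true, Bool.and_eq_true, Bool.not_eq_true',
        List.isEmpty_eq_false_iff]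
      -- names_text keyword membership ↔ per-name membership
      have hjoin : ∀ kw : String, kw.toList ≠ [] → ' ' ∉ kw.toList →
          (PySem.Str.isIn kw (PySem.Str.join " " (normalized.map (fun ing => PySem.Str.lower ing.1))) = true
           ↔ ∃ ing ∈ normalized, PySem.Str.isIn kw (PySem.Str.lower ing.1) = true) := by
        intro kw hne hsp
        rw [PySem.Str.isIn_iff_infix, PySem.Str.toList_join]
        have hj : PySem.Chars.join " ".toList ((normalized.map (fun ing => PySem.Str.lower ing.1)).map String.toList)
            = List.intercalate [' '] ((normalized.map (fun ing => PySem.Str.lower ing.1)).map String.toList) := rfl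
        rw [hj, pv_infix_intercalate_iff hne hsp]
        constructor
        · rintro ⟨l, hl, hi⟩
          rcases List.mem_map.mp hl with ⟨t, ht, rfl⟩
          rcases List.mem_map.mp ht with ⟨ing, hing, rfl⟩
          exact ⟨ing, hing, (PySem.Str.isIn_iff_infix _ _).mpr hi⟩
        · rintro ⟨ing, hing, hi⟩
          refine ⟨(PySem.Str.lower ing.1).toList, ?_, (PySem.Str.isIn_iff_infix _ _).mp hi⟩
          exact List.mem_map.mpr ⟨PySem.Str.lower ing.1, List.mem_map.mpr ⟨ing, hing, rfl⟩, rfl⟩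
      -- matched membership ↔ rule with matching key
      have hmr : ∀ a, a ∈ matched ↔ ∃ r ∈ pvRules, r.1 = a ∧ PySem.Str.isIn a (PySem.Str.lower allergy_text) = true := by
        intro a
        rw [hm, List.mem_filter, ← pv_rules_keys]
        constructor
        · rintro ⟨hk, hp⟩
          rcases List.mem_map.mp hk with ⟨r, hr, rfl⟩
          exact ⟨r, hr, rfl, hp⟩
        · rintro ⟨r, hr, rfl, hp⟩
          exact ⟨List.mem_map.mpr ⟨r, hr, rfl⟩, hp⟩
      constructor
      · rintro (⟨a, ha, hne⟩ | ⟨a, ha, kw, hkw, hin⟩)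
        · -- category hit in A ⇒ a rule/field hit in B
          rcases List.exists_mem_of_ne_nil _ hne with ⟨x, hx⟩
          rw [PySem.Set.mem_inter] at hx
          rcases hx with ⟨hx1, hx2⟩
          rw [PySem.Set.mem_ofList] at hx2
          rcases (pv_mem_catfold _ _ _).mp hx1 with hempty | ⟨ing, hing, _, rfl⟩
          · simp [PySem.Set.empty] at hempty
          rcases (hmr a).mp ha with ⟨r, hr, rfl, hp⟩
          rcases pv_rules_spec r hr with ⟨hcats, _⟩
          refine ⟨r, hr, hp, (PySem.Str.lower ing.1, PySem.Str.lower ing.2),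
            List.mem_map.mpr ⟨ing, hing, rfl⟩, Or.inl ?_⟩
          rw [hcats]
          exact (List.contains_iff_mem).mpr hx2
        · -- keyword hit in A ⇒ a rule/field hit in B
          rcases (hmr a).mp ha with ⟨r, hr, rfl, hp⟩
          rcases pv_rules_spec r hr with ⟨_, hkws⟩
          rcases pv_kw_ok r.1 (hsub r.1 ha) kw hkw with ⟨hkne, hksp⟩
          rcases (hjoin kw hkne hksp).mp hin with ⟨ing, hing, hi⟩
          refine ⟨r, hr, hp, (PySem.Str.lower ing.1, PySem.Str.lower ing.2),
            List.mem_map.mpr ⟨ing, hing, rfl⟩, Or.inr ?_⟩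
          exact ⟨kw, hkws ▸ hkw, hi⟩
      · rintro ⟨r, hr, hp, f, hf, hhit⟩
        rcases List.mem_map.mp hf with ⟨ing, hing, rfl⟩
        have ha : r.1 ∈ matched := (hmr r.1).mpr ⟨r, hr, rfl, hp⟩
        rcases pv_rules_spec r hr with ⟨hcats, hkws⟩
        rcases hhit with hcat | ⟨kw, hkw, hi⟩
        · -- category hit in B ⇒ A's intersection is nonempty for this rule
          rw [hcats, List.contains_iff_mem] at hcat
          have hne2 : PySem.Str.lower ing.2 ≠ "" := by
            intro he; exact pv_no_empty_cat r.1 (hsub r.1 ha) (he ▸ hcat)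
          refine Or.inl ⟨r.1, ha, fun hnil => ?_⟩
          have hmem : PySem.Str.lower ing.2 ∈ PySem.Set.inter
              (normalized.foldl (fun s ing => if PySem.Str.lower ing.2 ≠ "" then PySem.Set.add s (PySem.Str.lower ing.2) else s) PySem.Set.empty)
              (PySem.Set.ofList ((catOf r.1).map PySem.Str.lower)) := by
            rw [PySem.Set.mem_inter, PySem.Set.mem_ofList]
            exact ⟨(pv_mem_catfold _ _ _).mpr (Or.inr ⟨ing, hing, hne2, rfl⟩), hcat⟩
          rw [hnil] at hmem
          cases hmem
        · -- keyword hit in B ⇒ A's joined-names search hits for this rule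
          rw [hkws] at hkw
          rcases pv_kw_ok r.1 (hsub r.1 ha) kw hkw with ⟨hkne, hksp⟩
          exact Or.inr ⟨r.1, ha, kw, hkw, (hjoin kw hkne hksp).mpr ⟨ing, hing, hi⟩⟩

-- ===== VERDICT (by name: the statement is the Claim_ definition above) =====
theorem violates_allergies_spec : Claim_equal_violates_allergies := by
  intro ingredients allergy_text _ _
  unfold Spec_violates_allergies
  exact pv_main ingredients allergy_text
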